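-- pv_equiv track=rewrite | github.com/letsbrewcode/python-coding-lab | lab-6/solutions/odd_replace.py | odd_replace
-- ===== SOURCE A (Python) =====
-- def odd_replace(s):
--     ans = ''
--     for i in range(len(s)):
--         if i % 2 == 0:
--             ans += '-'
--         else:
--             ans += s[i]
--     return ans
-- ===== SOURCE B (Python) =====
-- def odd_replace(s):
--     chars = list(s)
--     chars[::2] = '-' * len(chars[::2])
--     return ''.join(chars)
-- ===== Notes on version B (the rewrite author's own statement) =====
-- stated objective: idiomatic
-- what changed: Replaced A's per-index loop with a modulo branch and repeated string concatenation by a bulk slice-assignment: list the characters, overwrite the even-index slice with a dash string of matching length, and join.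
import Mathlib
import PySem

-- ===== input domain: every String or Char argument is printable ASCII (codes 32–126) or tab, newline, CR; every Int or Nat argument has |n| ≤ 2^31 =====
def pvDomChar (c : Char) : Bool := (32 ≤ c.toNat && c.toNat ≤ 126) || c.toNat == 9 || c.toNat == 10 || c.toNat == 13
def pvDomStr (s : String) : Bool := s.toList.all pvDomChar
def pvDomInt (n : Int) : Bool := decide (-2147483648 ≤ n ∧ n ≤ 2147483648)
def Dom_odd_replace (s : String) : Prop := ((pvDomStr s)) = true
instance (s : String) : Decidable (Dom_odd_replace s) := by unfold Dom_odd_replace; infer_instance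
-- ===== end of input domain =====

-- B replaces A's per-index loop (modulo branch + repeated concatenation) with one bulk
-- slice-assignment over the character list; objective: idiomatic.

-- ===== PORT A =====
-- ans = ''; for i in range(len(s)): ans += '-' if i % 2 == 0 else s[i]; return ans
def odd_replace (s : String) : String :=
  String.ofList
    ((PySem.List.pyRange 0 (PySem.Str.len s) 1).foldl
      (fun ans i =>
        if PySem.Int.mod i 2 = 0 then ans ++ ['-']
        else ans ++ ((PySem.List.pyGet? s.toList i).getD ' ' :: []))  -- s[i], i always in range
      [])

-- ===== PORT B =====
-- slice assignment chars[::2] = repl (lengths match): write repl's elements at 0,2,4,…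
def pvAssignStep2 : List Char → List Char → List Char
  | [], cs => cs
  | _ :: _, [] => []
  | r :: rs, _ :: cs =>
    match cs with
    | [] => [r]
    | d :: ds => r :: d :: pvAssignStep2 rs ds

-- chars = list(s); chars[::2] = '-' * len(chars[::2]); return ''.join(chars)
def odd_replace_alt (s : String) : String :=
  let chars := s.toList
  let k := ((PySem.List.slice? chars none none 2).getD []).length
  String.ofList (pvAssignStep2 (List.replicate k '-') chars)

-- ===== PRECONDITION & SPEC =====
def Spec_odd_replace (s : String) (out : String) : Prop := out = odd_replace_alt s
instance (s : String) (out : String) : Decidable (Spec_odd_replace s out) := by unfold Spec_odd_replace; infer_instance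

-- ===== CLAIM (what is proved, stated in full; the proofs are below) =====
def Claim_equal_odd_replace : Prop := ∀ (s : String), Dom_odd_replace s → Spec_odd_replace s (odd_replace s)

-- ===== LEMMAS AND PROOFS =====

-- len(chars[::2]) = ⌈n/2⌉
theorem pv_len_slice2 (xs : List Char) :
    ((PySem.List.slice? xs none none 2).getD []).length = (xs.length + 1) / 2 := by
  simp [PySem.List.slice?, PySem.List.sliceIndices]
  by_cases hx : 0 < xs.length
  · rw [if_pos hx, List.filterMap_length_eq_length.mpr, List.length_range]
    · omega
    · intro k hk
      simp only [List.mem_range] at hk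
      have : (2 * (k : Int)).toNat < xs.length := by omega
      simp [this]
  · rw [if_neg hx]
    simp
    omega

-- the slice-assignment of ⌈n/2⌉ dashes equals the index-by-index replacement
theorem pv_assign_eq (cs : List Char) :
    pvAssignStep2 (List.replicate ((cs.length + 1) / 2) '-') cs
      = (List.range cs.length).map (fun k => if k % 2 = 0 then '-' else cs.getD k ' ') := by
  match cs with
  | [] => simp [pvAssignStep2]
  | [c] => simp [pvAssignStep2]
  | c :: d :: cs =>
    have ih := pv_assign_eq cs
    have hlen : ((c :: d :: cs).length + 1) / 2 = (cs.length + 1) / 2 + 1 := by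
      simp; omega
    rw [hlen, List.replicate_succ]
    show '-' :: d :: pvAssignStep2 (List.replicate ((cs.length + 1) / 2) '-') cs = _
    rw [ih]
    have hr : List.range (c :: d :: cs).length
        = 0 :: 1 :: (List.range cs.length).map (fun k => k + 2) := by
      simp [List.length_cons, List.range_succ_eq_map, List.map_map, Function.comp]
    rw [hr]
    simp only [List.map_cons, List.map_map]
    refine List.cons_eq_cons.mpr ⟨by norm_num, List.cons_eq_cons.mpr ⟨by simp [List.getD], ?_⟩⟩
    refine List.map_congr_left (fun k _ => ?_)
    simp only [Function.comp]
    have h2 : (k + 2) % 2 = k % 2 := by omega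
    rw [h2]
    rfl

-- A's loop as a map over the index range
theorem pv_a_eq_map (cs : List Char) :
    (PySem.List.pyRange 0 (cs.length : Int) 1).foldl
      (fun ans i =>
        if PySem.Int.mod i 2 = 0 then ans ++ ['-']
        else ans ++ ((PySem.List.pyGet? cs i).getD ' ' :: []))
      []
    = (List.range cs.length).map (fun k => if k % 2 = 0 then '-' else cs.getD k ' ') := by
  rw [show (fun ans i =>
        if PySem.Int.mod i 2 = 0 then ans ++ ['-']
        else ans ++ ((PySem.List.pyGet? cs i).getD ' ' :: []))
      = (fun (ans : List Char) i => ans ++ [if PySem.Int.mod i 2 = 0 then '-'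
            else (PySem.List.pyGet? cs i).getD ' ']) from by
    funext ans i; split_ifs <;> rfl]
  rw [PySem.List.foldl_append_singleton_eq_map]
  rw [PySem.List.pyRange_zero_natCast, List.map_map]
  refine List.map_congr_left (fun k hk => ?_)
  simp only [List.mem_range] at hk
  have hm : PySem.Int.mod (k : Int) 2 = ((k % 2 : Nat) : Int) := by
    exact_mod_cast PySem.Int.mod_natCast k 2
  rw [Function.comp_apply, hm]
  have hc : (((k % 2 : Nat) : Int) = 0) ↔ k % 2 = 0 := by exact_mod_cast Iff.rfl
  rw [if_congr hc rfl rfl, PySem.List.pyGet?_natCast]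
  rw [List.getD_eq_getElem?_getD]

-- ===== VERDICT (by name: the statement is the Claim_ definition above) =====
theorem odd_replace_spec : Claim_equal_odd_replace := by
  intro s _
  unfold Spec_odd_replace odd_replace odd_replace_alt
  show _ = String.ofList (pvAssignStep2
      (List.replicate (((PySem.List.slice? s.toList none none 2).getD []).length) '-') s.toList)
  rw [pv_len_slice2, pv_assign_eq, PySem.Str.len_eq, pv_a_eq_map]
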